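-- pv_equiv track=rewrite | github.com/abc123me/nasa_dsn | net/auth.py | verifyUsername
-- ===== SOURCE A (Python) =====
-- def charInRange(c, mi, ma):
-- 	return (ord(c) >= ord(mi) and ord(c) <= ord(ma))
--
-- def verifyUsername(username):
-- 	if(username == None or username == "" or len(username) <= 0):
-- 		return (False, "Username not provided!")
-- 	if(type(username) != type("str")):
-- 		return (False, "Username must be a string!")
-- 	if(len(username) > 256):
-- 		return (False, "Username cannot be over 256 characters!")
-- 	for c in username:
-- 		if((not charInRange(c, 'a', 'z')) and (not charInRange(c, 'A', 'Z')) and (not charInRange(c, '0', '9')) and (c not in "_-!@#$%^&*")):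
-- 			return (False, "Username is not alphanumeric!")
-- 	return (True, "Username exists!")
-- ===== SOURCE B (Python) =====
-- import re
--
-- _USERNAME_RE = re.compile(r'[A-Za-z0-9_!@#$%^&*-]+')
--
-- def verifyUsername(username):
-- 	if(username == None or username == "" or len(username) <= 0):
-- 		return (False, "Username not provided!")
-- 	if(type(username) != type("str")):
-- 		return (False, "Username must be a string!")
-- 	if(len(username) > 256):
-- 		return (False, "Username cannot be over 256 characters!")
-- 	if _USERNAME_RE.fullmatch(username) is None:
-- 		return (False, "Username is not alphanumeric!")
-- 	return (True, "Username exists!")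
-- ===== Notes on version B (the rewrite author's own statement) =====
-- stated objective: idiomatic
-- what changed: The explicit per-character ord-range scan (charInRange helper plus a loop with membership in a punctuation string) is replaced by a single precompiled regex fullmatch against the character class [A-Za-z0-9_!@#$%^&*-]; the guard blocks are unchanged.
import Mathlib
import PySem

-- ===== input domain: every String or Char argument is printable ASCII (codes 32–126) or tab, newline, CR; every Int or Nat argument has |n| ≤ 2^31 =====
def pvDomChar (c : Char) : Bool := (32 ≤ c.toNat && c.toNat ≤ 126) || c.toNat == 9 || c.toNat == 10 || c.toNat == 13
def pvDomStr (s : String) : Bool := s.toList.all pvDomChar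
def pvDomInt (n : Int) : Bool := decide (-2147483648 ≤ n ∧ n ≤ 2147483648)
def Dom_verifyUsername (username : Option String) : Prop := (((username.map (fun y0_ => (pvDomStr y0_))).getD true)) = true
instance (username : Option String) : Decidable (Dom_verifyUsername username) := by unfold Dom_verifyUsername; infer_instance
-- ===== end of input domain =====

-- B replaces A's explicit per-character ord-range loop by one regex-style character-class
-- full match (Python: re.fullmatch on [A-Za-z0-9_!@#$%^&*-]+); return values are identical.

-- ===== PORT A =====
def charInRange (c mi ma : Char) : Bool :=
  decide (mi.toNat ≤ c.toNat) && decide (c.toNat ≤ ma.toNat)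

-- the 'for c in username' loop with its early return
def verifyUsernameLoop : List Char → Bool × String
  | [] => (true, "Username exists!")
  | c :: rest =>
    if (!charInRange c 'a' 'z') && (!charInRange c 'A' 'Z') && (!charInRange c '0' '9')
        && !(("_-!@#$%^&*".toList).contains c) then
      (false, "Username is not alphanumeric!")
    else verifyUsernameLoop rest

def verifyUsername (username : Option String) : Bool × String :=
  match username with
  | none => (false, "Username not provided!")
  | some s =>
    if s = "" then (false, "Username not provided!")
    -- 'type(username) != type("str")' is always False for a string argument
    else if s.toList.length > 256 then (false, "Username cannot be over 256 characters!")
    else verifyUsernameLoop s.toList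

-- ===== PORT B =====
-- membership in the regex character class [A-Za-z0-9_!@#$%^&*-]
def usernameClassChar (c : Char) : Bool :=
  (decide ('A'.toNat ≤ c.toNat) && decide (c.toNat ≤ 'Z'.toNat))
  || (decide ('a'.toNat ≤ c.toNat) && decide (c.toNat ≤ 'z'.toNat))
  || (decide ('0'.toNat ≤ c.toNat) && decide (c.toNat ≤ '9'.toNat))
  || (['_', '!', '@', '#', '$', '%', '^', '&', '*', '-'].contains c)

-- fullmatch of [class]+ : non-empty and every character in the class
def usernameFullmatch (s : String) : Bool :=
  !(s.toList.isEmpty) && s.toList.all usernameClassChar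

def verifyUsername_alt (username : Option String) : Bool × String :=
  match username with
  | none => (false, "Username not provided!")
  | some s =>
    if s = "" then (false, "Username not provided!")
    else if s.toList.length > 256 then (false, "Username cannot be over 256 characters!")
    else if !(usernameFullmatch s) then (false, "Username is not alphanumeric!")
    else (true, "Username exists!")

-- ===== PRECONDITION & SPEC =====
def Spec_verifyUsername (username : Option String) (out : Bool × String) : Prop := out = verifyUsername_alt username
instance (username : Option String) (out : Bool × String) : Decidable (Spec_verifyUsername username out) := by unfold Spec_verifyUsername; infer_instance

-- ===== CLAIM (what is proved, stated in full; the proofs are below) =====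
def Claim_equal_verifyUsername : Prop := ∀ (username : Option String), Dom_verifyUsername username → Spec_verifyUsername username (verifyUsername username)

-- ===== LEMMAS AND PROOFS =====

-- A's loop condition rejects exactly the characters outside the regex class
set_option maxRecDepth 4000 in
lemma bad_eq (c : Char) :
    ((!charInRange c 'a' 'z') && (!charInRange c 'A' 'Z') && (!charInRange c '0' '9')
        && !(("_-!@#$%^&*".toList).contains c)) = !usernameClassChar c := by
  rw [Bool.eq_iff_iff]
  simp [charInRange, usernameClassChar]
  tauto

lemma loop_eq (cs : List Char) :
    verifyUsernameLoop cs =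
      if cs.all usernameClassChar then (true, "Username exists!")
      else (false, "Username is not alphanumeric!") := by
  induction cs with
  | nil => simp [verifyUsernameLoop]
  | cons c rest ih =>
    rw [verifyUsernameLoop, bad_eq c, ih]
    cases hc : usernameClassChar c <;> simp [hc]

-- ===== VERDICT (by name: the statement is the Claim_ definition above) =====
theorem verifyUsername_spec : Claim_equal_verifyUsername := by
  intro username _
  unfold Spec_verifyUsername verifyUsername verifyUsername_alt
  match username with
  | none => rfl
  | some s =>
    by_cases he : s = ""
    · simp [he]
    · by_cases hl : s.toList.length > 256
      · simp only [String.length_toList] at hl ⊢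
        simp [he, hl]
      · simp only [String.length_toList] at hl ⊢
        simp only [he, if_false, loop_eq]
        by_cases hall : s.toList.all usernameClassChar
        · have hne : s.toList.isEmpty = false := by
            cases h : s.toList with
            | nil => exact absurd (by cases s; simp_all) he
            | cons a t => simp
          simp [usernameFullmatch, hall, hne, hl]
        · simp [usernameFullmatch, hall, hl]
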